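-- pv_equiv track=rewrite | github.com/minhdqdev/dsa | hackerrank/count-strings.py | countCases
-- ===== SOURCE A (Python) =====
-- def countCases(arr, remind, l):
--     """
--     Input:
--         arr[]: contain the lengths of elements
--         remind[]: containt the result of countCases with l is the index of remind[].
--         l: length of required strings
--     Output:
--         count: the number of way to construct a string with length l using elements from arr.
--     Example:
--         arr = [1,1]
--         l = 5
--         -> count = 32
--     """
--     if l == 0:
--         return 0
--
--     temp_count = len(list(filter(lambda x: x == l, arr)))
--
--     temp_count_2 = 0
--     for k in range(1, l):
--         if remind[k] is not None:
--             if remind[l-k] is not None: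
--                 temp_count_2 += remind[k] + remind[l-k]
--             else:
--                 temp_count_2 += remind[k] + countCases(arr, remind, l-k)
--         else:
--             if remind[l-k] is not None:
--                 temp_count_2 += countCases(arr, remind, k) + remind[l-k]
--             else:
--                 temp_count_2 += countCases(arr, remind, k) + countCases(arr, remind, l-k)
--
--     remind[l] = temp_count_2 + temp_count
--     return temp_count_2 + temp_count
-- ===== SOURCE B (Python) =====
-- def countCases(arr, remind, l):
--     # Return-value equivalent to A (A also fills remind[] in place; B does not mutate it).
--     if l == 0:
--         return 0
--     counts = {}
--     for x in arr:
--         counts[x] = counts.get(x, 0) + 1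
--     s = 0
--     for m in range(1, l):
--         v = remind[m]
--         s += v if v is not None else counts.get(m, 0) + 2 * s
--     return counts.get(l, 0) + 2 * s
-- ===== Notes on version B (the rewrite author's own statement) =====
-- stated objective: faster
-- what changed: Replaces A's memoised recursion (which rescans arr with filter and recurses for every missing remind entry, summing F(k)+F(l-k) over a length-l loop per level) by one left-to-right pass keeping a running prefix sum S with F(m)=remind[m] or counts[m]+2*S, using a count dictionary built once; B does not mutate remind (A fills it in place), the return value is identical.
import Mathlib
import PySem

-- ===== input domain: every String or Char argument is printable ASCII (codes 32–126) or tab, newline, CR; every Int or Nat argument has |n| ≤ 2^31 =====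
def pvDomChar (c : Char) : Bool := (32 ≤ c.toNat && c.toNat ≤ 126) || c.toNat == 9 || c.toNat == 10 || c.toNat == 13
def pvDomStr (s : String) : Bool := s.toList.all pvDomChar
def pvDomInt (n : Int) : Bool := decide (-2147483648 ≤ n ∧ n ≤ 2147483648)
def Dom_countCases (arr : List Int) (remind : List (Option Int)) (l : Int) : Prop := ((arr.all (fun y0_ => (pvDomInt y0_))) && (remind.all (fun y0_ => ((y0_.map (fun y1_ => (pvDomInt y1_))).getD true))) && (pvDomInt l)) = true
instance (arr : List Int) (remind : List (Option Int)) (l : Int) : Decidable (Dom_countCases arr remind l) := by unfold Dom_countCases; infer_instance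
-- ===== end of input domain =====

-- B replaces A's memoised recursion (which re-scans arr and recurses for every missing
-- remind entry) by a single left-to-right pass with a running prefix sum and a
-- precomputed count dictionary. Equivalence is about the RETURN value only: A fills
-- entries of remind in place, B does not mutate it.

-- ===== PORT A =====
mutual
-- the loop 'for k in range(1, l)' of A, threading (remind, temp_count_2); ks = remaining k's
def pvALoop (arr : List Int) (l : Int) :
    List {k // k ∈ PySem.List.pyRange 1 l 1} → List (Option Int) × Int → List (Option Int) × Int
  | [], st => st
  | kk :: rest, (remind, acc) =>
    let k := kk.1
    match PySem.List.pyGetD remind k none with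
    | some rk =>
      match PySem.List.pyGetD remind (l - k) none with
      | some rlk => pvALoop arr l rest (remind, acc + (rk + rlk))
      | none =>
        let q := pvACase arr remind (l - k)
        pvALoop arr l rest (q.2, acc + (rk + q.1))
    | none =>
      -- Python re-reads remind[l-k] after the call countCases(arr, remind, k); that call
      -- never changes a non-None entry other than remind[k] (k ≠ l-k here), so the
      -- pre-read value used below is exact.
      match PySem.List.pyGetD remind (l - k) none with
      | some rlk =>
        let q := pvACase arr remind k
        pvALoop arr l rest (q.2, acc + (q.1 + rlk))
      | none =>
        let q := pvACase arr remind k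
        let q2 := pvACase arr q.2 (l - k)
        pvALoop arr l rest (q2.2, acc + (q.1 + q2.1))
termination_by ks st => (l.toNat, ks.length)
decreasing_by
  all_goals have h := PySem.List.mem_pyRange_one.mp kk.2
  all_goals simp_wf
  all_goals omega

-- countCases body: returns (value, updated remind)
def pvACase (arr : List Int) (remind : List (Option Int)) (l : Int) : Int × List (Option Int) :=
  if l = 0 then (0, remind)
  else
    let temp_count : Int := ((arr.filter (fun x => x == l)).length : Int)
    let st := pvALoop arr l ((PySem.List.pyRange 1 l 1).attach) (remind, 0)
    let res := st.2 + temp_count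
    (res, PySem.List.pySetD st.1 l res)
termination_by (l.toNat, (l - 1).toNat + 1)
decreasing_by
  simp_wf
  omega
end

def countCases (arr : List Int) (remind : List (Option Int)) (l : Int) : Int :=
  (pvACase arr remind l).1

-- ===== PORT B =====
def countCases_alt (arr : List Int) (remind : List (Option Int)) (l : Int) : Int :=
  if l = 0 then 0
  else
    let counts : PySem.Dict Int Int :=
      arr.foldl (fun d x => d.insert x (d.getD x 0 + 1)) PySem.Dict.empty
    let s : Int := (PySem.List.pyRange 1 l 1).foldl
      (fun s m =>
        match PySem.List.pyGetD remind m none with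
        | some v => s + v
        | none => s + (counts.getD m 0 + 2 * s)) 0
    counts.getD l 0 + 2 * s

-- ===== PRECONDITION & SPEC =====
-- Exactly the inputs on which Python A returns: for l ≥ 1 it reads remind[1..l-1] and
-- assigns remind[l] (IndexError unless l < len(remind)); for l < 0 the assignment uses a
-- negative index (IndexError unless -l ≤ len(remind)); l = 0 always returns.
def Pre_countCases (arr : List Int) (remind : List (Option Int)) (l : Int) : Prop :=
  l = 0 ∨ (0 < l ∧ l < (remind.length : Int)) ∨ (l < 0 ∧ -l ≤ (remind.length : Int))
instance (arr : List Int) (remind : List (Option Int)) (l : Int) : Decidable (Pre_countCases arr remind l) := by unfold Pre_countCases; infer_instance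

def pvWitness_countCases : List Int × List (Option Int) × Int :=
  ([1, 1], [none, none, some 7, none, none, none], 5)

def Spec_countCases (arr : List Int) (remind : List (Option Int)) (l : Int) (out : Int) : Prop := out = countCases_alt arr remind l
instance (arr : List Int) (remind : List (Option Int)) (l : Int) (out : Int) : Decidable (Spec_countCases arr remind l out) := by unfold Spec_countCases; infer_instance

-- ===== CLAIM (what is proved, stated in full; the proofs are below) =====
def Claim_equal_countCases : Prop := ∀ (arr : List Int) (remind : List (Option Int)) (l : Int), Dom_countCases arr remind l → Pre_countCases arr remind l → Spec_countCases arr remind l (countCases arr remind l)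


-- ===== LEMMAS AND PROOFS =====

-- the memo table semantics: pvSv arr rem0 t = Σ_{k=1}^{t} F(k), where F(k) is rem0[k] if
-- set and count(k) + 2·Σ_{i<k} F(i) otherwise; pvFv arr rem0 k = F(k).
def pvSv (arr : List Int) (rem0 : List (Option Int)) : Nat → Int
  | 0 => 0
  | m + 1 =>
    pvSv arr rem0 m +
      (match rem0.getD (m + 1) none with
       | some v => v
       | none => (arr.count ((m + 1 : Nat) : Int) : Int) + 2 * pvSv arr rem0 m)

def pvFv (arr : List Int) (rem0 : List (Option Int)) (m : Nat) : Int :=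
  match rem0.getD m none with
  | some v => v
  | none => (arr.count ((m : Nat) : Int) : Int) + 2 * pvSv arr rem0 (m - 1)

lemma pvSv_succ (arr : List Int) (rem0 : List (Option Int)) (m : Nat) :
    pvSv arr rem0 (m + 1) = pvSv arr rem0 m + pvFv arr rem0 (m + 1) := by
  simp [pvSv, pvFv]

-- invariant: r is rem0 with some previously-None entries filled with their F-values
def pvExt (arr : List Int) (rem0 r : List (Option Int)) : Prop :=
  r.length = rem0.length ∧
  ∀ j : Nat, r.getD j none = rem0.getD j none ∨
    (rem0.getD j none = none ∧ r.getD j none = some (pvFv arr rem0 j))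

lemma pvExt_refl (arr : List Int) (rem0 : List (Option Int)) : pvExt arr rem0 rem0 := by
  exact ⟨rfl, fun j => Or.inl rfl⟩

lemma pvExt_read_some (arr : List Int) (rem0 r : List (Option Int)) (h : pvExt arr rem0 r)
    (j : Nat) (w : Int) (hw : r.getD j none = some w) : w = pvFv arr rem0 j := by
  rcases (h.2 j) with h1 | ⟨h1, h2⟩
  · rw [h1] at hw
    unfold pvFv
    rw [hw]
  · rw [h2] at hw
    exact (Option.some_inj.mp hw).symm

lemma pvExt_read_none (arr : List Int) (rem0 r : List (Option Int)) (h : pvExt arr rem0 r)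
    (j : Nat) (hw : r.getD j none = none) : rem0.getD j none = none := by
  rcases (h.2 j) with h1 | ⟨h1, h2⟩
  · rw [← h1, hw]
  · exact h1

lemma pvExt_write (arr : List Int) (rem0 r : List (Option Int)) (h : pvExt arr rem0 r)
    (l : Int) (h1 : 1 ≤ l) (h2 : l < (rem0.length : Int))
    (h0 : rem0.getD l.toNat none = none) :
    pvExt arr rem0 (PySem.List.pySetD r l (pvFv arr rem0 l.toNat)) := by
  have hlr : r.length = rem0.length := h.1
  have hlt : l.toNat < r.length := by omega
  rw [PySem.List.pySetD_of_nonneg _ _ (by omega)]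
  refine ⟨by simpa using hlr, fun j => ?_⟩
  by_cases hj : j = l.toNat
  · subst hj
    right
    refine ⟨h0, ?_⟩
    simp [List.getD, List.getElem?_set, hlt]
  · have hset : (r.set l.toNat (some (pvFv arr rem0 l.toNat))).getD j none = r.getD j none := by
      simp [List.getD, List.getElem?_set, Ne.symm hj]
    rw [hset]
    exact h.2 j

-- Nat-level sums: Σ_{k=0}^{t-1} F(k+1) = Sv t, and the reflected sum
lemma pvSum_fwd (arr : List Int) (rem0 : List (Option Int)) : ∀ t : Nat,
    ((List.range t).map (fun k => pvFv arr rem0 (k + 1))).sum = pvSv arr rem0 t := by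
  intro t
  induction t with
  | zero => simp [pvSv]
  | succ t ih => rw [List.range_succ]; simp [ih, pvSv_succ]

lemma pvSum_rev (arr : List Int) (rem0 : List (Option Int)) : ∀ t : Nat,
    ((List.range t).map (fun k => pvFv arr rem0 (t - k))).sum = pvSv arr rem0 t := by
  intro t
  induction t with
  | zero => simp [pvSv]
  | succ t ih =>
    rw [List.range_succ_eq_map]
    simp only [List.map_cons, List.map_map, List.sum_cons, Nat.sub_zero]
    have hmap : (List.range t).map ((fun k => pvFv arr rem0 (t + 1 - k)) ∘ Nat.succ)
        = (List.range t).map (fun k => pvFv arr rem0 (t - k)) := by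
      apply List.map_congr_left
      intro k _
      simp [Function.comp, Nat.succ_sub_succ]
    rw [hmap, ih, pvSv_succ]
    ring

-- the loop total of A: Σ_{k=1}^{l-1} (F(k) + F(l-k)) = 2 · Sv (l-1)
lemma pvSum_pair (arr : List Int) (rem0 : List (Option Int)) (l : Int) (h : 1 ≤ l) :
    ((PySem.List.pyRange 1 l 1).map
      (fun k => pvFv arr rem0 k.toNat + pvFv arr rem0 (l - k).toNat)).sum
      = 2 * pvSv arr rem0 (l.toNat - 1) := by
  have ht : ((l.toNat - 1 : Nat) : Int) = l - 1 := by omega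
  rw [PySem.List.pyRange_one, List.map_map]
  have hmap : (List.range (l - 1).toNat).map
        ((fun k => pvFv arr rem0 k.toNat + pvFv arr rem0 (l - k).toNat) ∘ (fun (k : Nat) => (1 : Int) + k))
      = (List.range (l.toNat - 1)).map
        (fun k => pvFv arr rem0 (k + 1) + pvFv arr rem0 (l.toNat - 1 - k)) := by
    have hll : (l - 1).toNat = l.toNat - 1 := by omega
    rw [hll]
    apply List.map_congr_left
    intro k hk
    have hk' : k < l.toNat - 1 := List.mem_range.mp hk
    have e1 : ((1 : Int) + (k : Int)).toNat = k + 1 := by omega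
    have e2 : (l - ((1 : Int) + (k : Int))).toNat = l.toNat - 1 - k := by omega
    simp [Function.comp, e1, e2]
  rw [hmap, PySem.List.sum_map_add_int, pvSum_fwd, pvSum_rev]
  ring

lemma pvCount_filter (arr : List Int) (l : Int) :
    ((arr.filter (fun x => x == l)).length : Int) = (arr.count l : Int) := by
  simp [List.count_eq_length_filter]

lemma pvGetD_toNat (xs : List (Option Int)) (i : Int) (h : 0 ≤ i) :
    PySem.List.pyGetD xs i none = xs.getD i.toNat none := by
  rw [show i = ((i.toNat : Nat) : Int) by omega, PySem.List.pyGetD_natCast]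
  have h2 : (max i 0).toNat = i.toNat := by omega
  simp [List.getD, h2]

lemma pvFv_of_none (arr : List Int) (rem0 : List (Option Int)) (j : Int) (hj : 0 ≤ j)
    (h : rem0.getD j.toNat none = none) :
    pvFv arr rem0 j.toNat = (arr.count j : Int) + 2 * pvSv arr rem0 (j.toNat - 1) := by
  unfold pvFv
  rw [h, show ((j.toNat : Nat) : Int) = j by omega]

lemma pvAttach_sum (xs : List Int) (f : Int → Int) :
    (xs.attach.map (fun kk => f kk.1)).sum = (xs.map f).sum := by
  rw [show (fun (kk : {x // x ∈ xs}) => f kk.1) = f ∘ Subtype.val from rfl,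
    ← List.map_map, List.attach_map_subtype_val]

lemma pvALoop_spec (arr : List Int) (rem0 : List (Option Int)) (l : Int)
    (hlen : l < (rem0.length : Int))
    (IH : ∀ (j : Int) (r : List (Option Int)), 1 ≤ j → j < l → pvExt arr rem0 r →
      (pvACase arr r j).1 = (arr.count j : Int) + 2 * pvSv arr rem0 (j.toNat - 1) ∧
      (rem0.getD j.toNat none = none → pvExt arr rem0 (pvACase arr r j).2)) :
    ∀ (ks : List {k // k ∈ PySem.List.pyRange 1 l 1}) (r : List (Option Int)) (acc : Int),
      pvExt arr rem0 r →
      (pvALoop arr l ks (r, acc)).2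
        = acc + (ks.map (fun kk => pvFv arr rem0 kk.1.toNat + pvFv arr rem0 (l - kk.1).toNat)).sum
      ∧ pvExt arr rem0 (pvALoop arr l ks (r, acc)).1 := by
  intro ks
  induction ks with
  | nil =>
    intro r acc hr
    refine ⟨by simp [pvALoop], by simpa [pvALoop] using hr⟩
  | cons kk rest ih =>
    intro r acc hr
    obtain ⟨hk1, hk2⟩ := PySem.List.mem_pyRange_one.mp kk.2
    have hj1 : (1 : Int) ≤ l - kk.1 := by omega
    have hj2 : l - kk.1 < l := by omega
    have hgk : PySem.List.pyGetD r kk.1 none = r.getD kk.1.toNat none :=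
      pvGetD_toNat _ _ (by omega)
    have hglk : PySem.List.pyGetD r (l - kk.1) none = r.getD (l - kk.1).toNat none :=
      pvGetD_toNat _ _ (by omega)
    rw [pvALoop]
    rw [hgk, hglk]
    cases hk : r.getD kk.1.toNat none with
    | some rk =>
      have hrk : rk = pvFv arr rem0 kk.1.toNat := pvExt_read_some arr rem0 r hr _ _ hk
      cases hlk : r.getD (l - kk.1).toNat none with
      | some rlk =>
        have hrlk : rlk = pvFv arr rem0 (l - kk.1).toNat := pvExt_read_some arr rem0 r hr _ _ hlk
        obtain ⟨ihv, ihe⟩ := ih r (acc + (rk + rlk)) hr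
        refine ⟨?_, ihe⟩
        rw [ihv, hrk, hrlk]
        simp [List.sum_cons]
        ring
      | none =>
        have h0 : rem0.getD (l - kk.1).toNat none = none := pvExt_read_none arr rem0 r hr _ hlk
        obtain ⟨hqv, hqe⟩ := IH (l - kk.1) r hj1 hj2 hr
        have hqext : pvExt arr rem0 (pvACase arr r (l - kk.1)).2 := hqe h0
        have hqfv : (pvACase arr r (l - kk.1)).1 = pvFv arr rem0 (l - kk.1).toNat := by
          rw [hqv, pvFv_of_none arr rem0 (l - kk.1) (by omega) h0]
        obtain ⟨ihv, ihe⟩ := ih (pvACase arr r (l - kk.1)).2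
          (acc + (rk + (pvACase arr r (l - kk.1)).1)) hqext
        refine ⟨?_, ihe⟩
        rw [ihv, hrk, hqfv]
        simp [List.sum_cons]
        ring
    | none =>
      have h0k : rem0.getD kk.1.toNat none = none := pvExt_read_none arr rem0 r hr _ hk
      obtain ⟨hqv, hqe⟩ := IH kk.1 r (by omega) (by omega) hr
      have hqext : pvExt arr rem0 (pvACase arr r kk.1).2 := hqe h0k
      have hqfv : (pvACase arr r kk.1).1 = pvFv arr rem0 kk.1.toNat := by
        rw [hqv, pvFv_of_none arr rem0 kk.1 (by omega) h0k]
      cases hlk : r.getD (l - kk.1).toNat none with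
      | some rlk =>
        have hrlk : rlk = pvFv arr rem0 (l - kk.1).toNat := pvExt_read_some arr rem0 r hr _ _ hlk
        obtain ⟨ihv, ihe⟩ := ih (pvACase arr r kk.1).2
          (acc + ((pvACase arr r kk.1).1 + rlk)) hqext
        refine ⟨?_, ihe⟩
        rw [ihv, hqfv, hrlk]
        simp [List.sum_cons]
        ring
      | none =>
        have h0lk : rem0.getD (l - kk.1).toNat none = none := pvExt_read_none arr rem0 r hr _ hlk
        obtain ⟨hq2v, hq2e⟩ := IH (l - kk.1) (pvACase arr r kk.1).2 hj1 hj2 hqext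
        have hq2ext : pvExt arr rem0 (pvACase arr (pvACase arr r kk.1).2 (l - kk.1)).2 := hq2e h0lk
        have hq2fv : (pvACase arr (pvACase arr r kk.1).2 (l - kk.1)).1
            = pvFv arr rem0 (l - kk.1).toNat := by
          rw [hq2v, pvFv_of_none arr rem0 (l - kk.1) (by omega) h0lk]
        obtain ⟨ihv, ihe⟩ := ih (pvACase arr (pvACase arr r kk.1).2 (l - kk.1)).2
          (acc + ((pvACase arr r kk.1).1 + (pvACase arr (pvACase arr r kk.1).2 (l - kk.1)).1)) hq2ext
        refine ⟨?_, ihe⟩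
        rw [ihv, hqfv, hq2fv]
        simp [List.sum_cons]
        ring

lemma pvACase_spec (arr : List Int) (rem0 : List (Option Int)) :
    ∀ (n : Nat) (l : Int) (r : List (Option Int)), l.toNat ≤ n → 1 ≤ l →
      l < (rem0.length : Int) → pvExt arr rem0 r →
      (pvACase arr r l).1 = (arr.count l : Int) + 2 * pvSv arr rem0 (l.toNat - 1) ∧
      (rem0.getD l.toNat none = none → pvExt arr rem0 (pvACase arr r l).2) := by
  intro n
  induction n using Nat.strong_induction_on with
  | _ n IHn =>
    intro l r hln h1 hlen hr
    have hne : ¬ l = 0 := by omega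
    have IH : ∀ (j : Int) (r' : List (Option Int)), 1 ≤ j → j < l → pvExt arr rem0 r' →
        (pvACase arr r' j).1 = (arr.count j : Int) + 2 * pvSv arr rem0 (j.toNat - 1) ∧
        (rem0.getD j.toNat none = none → pvExt arr rem0 (pvACase arr r' j).2) := by
      intro j r' hja hjb hr'
      exact IHn (n - 1) (by omega) j r' (by omega) hja (by omega) hr'
    obtain ⟨hlv, hle⟩ := pvALoop_spec arr rem0 l hlen IH
      ((PySem.List.pyRange 1 l 1).attach) r 0 hr
    have hsum : ((PySem.List.pyRange 1 l 1).attach.map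
        (fun kk => pvFv arr rem0 kk.1.toNat + pvFv arr rem0 (l - kk.1).toNat)).sum
        = 2 * pvSv arr rem0 (l.toNat - 1) := by
      rw [pvAttach_sum (PySem.List.pyRange 1 l 1)
        (fun k => pvFv arr rem0 k.toNat + pvFv arr rem0 (l - k).toNat)]
      exact pvSum_pair arr rem0 l h1
    rw [pvACase, if_neg hne]
    simp only [pvCount_filter]
    constructor
    · rw [hlv, hsum]
      omega
    · intro h0
      have hres : (pvALoop arr l (PySem.List.pyRange 1 l 1).attach (r, 0)).2
          + (arr.count l : Int) = pvFv arr rem0 l.toNat := by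
        rw [hlv, hsum, pvFv_of_none arr rem0 l (by omega) h0]
        omega
      rw [hres]
      exact pvExt_write arr rem0 _ hle l h1 hlen h0

lemma pvCountsD (arr : List Int) (v : Int) :
    (arr.foldl (fun d x => d.insert x (d.getD x 0 + 1)) PySem.Dict.empty).getD v 0
      = (arr.count v : Int) := by
  rw [PySem.Dict.foldl_insert_getD_add_one_eq_counter, PySem.Dict.getD_counter]

lemma pvBfold (arr : List Int) (rem0 : List (Option Int)) : ∀ t : Nat,
    (PySem.List.pyRange 1 ((t : Int) + 1) 1).foldl
      (fun s m =>
        match PySem.List.pyGetD rem0 m none with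
        | some v => s + v
        | none => s + ((arr.foldl (fun d x => d.insert x (d.getD x 0 + 1)) PySem.Dict.empty).getD m 0 + 2 * s)) 0
      = pvSv arr rem0 t := by
  intro t
  induction t with
  | zero =>
    rw [PySem.List.pyRange_one_eq_nil (by omega)]
    rfl
  | succ t ih =>
    have hc : ((t + 1 : Nat) : Int) + 1 = ((t : Int) + 1) + 1 := by push_cast; ring
    rw [hc, PySem.List.pyRange_one_succ_right (by omega), List.foldl_append, ih]
    simp only [List.foldl_cons, List.foldl_nil]
    have hg : PySem.List.pyGetD rem0 ((t : Int) + 1) none = rem0.getD (t + 1) none := by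
      rw [pvGetD_toNat rem0 ((t : Int) + 1) (by omega),
        show ((t : Int) + 1).toNat = t + 1 by omega]
    have hsv : pvSv arr rem0 (t + 1) = pvSv arr rem0 t +
        (match rem0.getD (t + 1) none with
         | some v => v
         | none => (arr.count ((t + 1 : Nat) : Int) : Int) + 2 * pvSv arr rem0 t) := rfl
    rw [hg, hsv]
    cases h : rem0.getD (t + 1) none with
    | some v => simp
    | none =>
      simp only [pvCountsD]
      push_cast
      ring

lemma pvB_val (arr : List Int) (rem0 : List (Option Int)) (l : Int) (h1 : 1 ≤ l) :
    countCases_alt arr rem0 l = (arr.count l : Int) + 2 * pvSv arr rem0 (l.toNat - 1) := by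
  obtain ⟨t, ht⟩ : ∃ t : Nat, (t : Int) + 1 = l := ⟨l.toNat - 1, by omega⟩
  subst ht
  have hne : ¬ (t : Int) + 1 = 0 := by omega
  have htn : ((t : Int) + 1).toNat - 1 = t := by omega
  rw [htn]
  simp only [countCases_alt, if_neg hne]
  rw [pvBfold arr rem0 t, pvCountsD]

-- ===== VERDICT (by name: the statement is the Claim_ definition above) =====
theorem countCases_spec : Claim_equal_countCases := by
  intro arr remind l _hd hpre
  unfold Spec_countCases countCases
  rcases hpre with h0 | ⟨h1, h2⟩ | ⟨h1, h2⟩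
  · subst h0
    rw [pvACase]
    simp [countCases_alt]
  · -- 0 < l < len(remind): both sides equal count(l) + 2·Sv(l-1)
    obtain ⟨hv, _⟩ := pvACase_spec arr remind l.toNat l remind le_rfl (by omega) h2
      (pvExt_refl arr remind)
    rw [hv, pvB_val arr remind l (by omega)]
  · -- l < 0: A's loop is empty and it returns the count of arr entries equal to l; so does B
    have hnil : PySem.List.pyRange 1 l 1 = [] := PySem.List.pyRange_one_eq_nil (by omega)
    have hne : ¬ l = 0 := by omega
    have hlen : l < (remind.length : Int) := by omega
    have IH : ∀ (j : Int) (r' : List (Option Int)), 1 ≤ j → j < l → pvExt arr remind r' →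
        (pvACase arr r' j).1 = (arr.count j : Int) + 2 * pvSv arr remind (j.toNat - 1) ∧
        (remind.getD j.toNat none = none → pvExt arr remind (pvACase arr r' j).2) := by
      intro j r' hja hjb _
      omega
    obtain ⟨hlv, _⟩ := pvALoop_spec arr remind l hlen IH
      ((PySem.List.pyRange 1 l 1).attach) remind 0 (pvExt_refl arr remind)
    have hsum0 : ((PySem.List.pyRange 1 l 1).attach.map
        (fun kk => pvFv arr remind kk.1.toNat + pvFv arr remind (l - kk.1).toNat)).sum = 0 := by
      rw [pvAttach_sum (PySem.List.pyRange 1 l 1)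
        (fun k => pvFv arr remind k.toNat + pvFv arr remind (l - k).toNat), hnil]
      rfl
    rw [pvACase, if_neg hne]
    simp only [pvCount_filter]
    rw [hlv, hsum0]
    simp only [countCases_alt, if_neg hne, hnil, List.foldl_nil, pvCountsD]
    omega
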